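-- pv_equiv track=rewrite | github.com/artemsaledev/meeting-digest-bot | meeting_digest_bot/service.py | _unique_extend
-- ===== SOURCE A (Python) =====
-- def _unique_extend(existing: list[str], candidates: list[str]) -> list[str]:
--     additions: list[str] = []
--     seen = set(existing)
--     for item in candidates:
--         if item not in seen:
--             additions.append(item)
--             seen.add(item)
--     return additions
-- ===== SOURCE B (Python) =====
-- def _unique_extend(existing: list[str], candidates: list[str]) -> list[str]:
--     out: list[str] = []
--     work = candidates
--     while work:
--         head = work[0]
--         if head not in existing:
--             out.append(head)
--         work = [c for c in work[1:] if c != head]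
--     return out
-- ===== Notes on version B (the rewrite author's own statement) =====
-- stated objective: alternative
-- what changed: Replaces A's seen-set bookkeeping with a worklist nub: each round emits the head (if absent from existing, tested against the original list) and physically filters all duplicates of it out of the remaining worklist, so no auxiliary set is ever built or consulted.
import Mathlib
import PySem

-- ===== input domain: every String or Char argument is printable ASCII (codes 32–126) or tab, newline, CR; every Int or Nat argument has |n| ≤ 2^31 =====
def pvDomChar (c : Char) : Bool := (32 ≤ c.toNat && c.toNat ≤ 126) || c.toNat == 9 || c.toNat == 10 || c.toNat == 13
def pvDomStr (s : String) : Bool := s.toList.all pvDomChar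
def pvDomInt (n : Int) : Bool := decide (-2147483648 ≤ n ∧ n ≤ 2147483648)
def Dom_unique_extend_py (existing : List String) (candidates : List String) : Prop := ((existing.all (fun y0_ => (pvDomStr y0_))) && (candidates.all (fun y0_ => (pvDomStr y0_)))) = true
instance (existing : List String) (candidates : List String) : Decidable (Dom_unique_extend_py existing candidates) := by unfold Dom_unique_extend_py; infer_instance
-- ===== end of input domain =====

-- B replaces A's seen-set loop by a worklist nub: each round emits the head (if not in existing) and filters its duplicates out of the remaining worklist; no auxiliary set is built (alternative decomposition, not faster).

-- ===== PORT A =====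
def unique_extend_py (existing : List String) (candidates : List String) : List String :=
  -- additions = []; seen = set(existing); for item in candidates: if item not in seen: append + add
  let seen := PySem.Set.ofList existing
  let st := candidates.foldl
    (fun (st : List String × PySem.Set String) item =>
      if !(PySem.Set.contains st.2 item) then (st.1 ++ [item], PySem.Set.add st.2 item) else st)
    ([], seen)
  st.1

-- ===== PORT B =====
-- while work: head = work[0]; if head not in existing: out.append(head); work = [c for c in work[1:] if c != head]
def pvAltLoop (existing : List String) (out : List String) (work : List String) : List String :=
  match work with
  | [] => out
  | head :: rest =>
      pvAltLoop existing (if existing.contains head then out else out ++ [head])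
        (rest.filter (fun c => !(c == head)))
termination_by work.length
decreasing_by
  simp only [List.length_unattach]
  exact Nat.lt_succ_of_le (le_trans (List.length_filter_le _ _) (le_of_eq List.length_attach))

def unique_extend_py_alt (existing : List String) (candidates : List String) : List String :=
  pvAltLoop existing [] candidates

-- ===== PRECONDITION & SPEC =====
def Spec_unique_extend_py (existing : List String) (candidates : List String) (out : List String) : Prop := out = unique_extend_py_alt existing candidates
instance (existing : List String) (candidates : List String) (out : List String) : Decidable (Spec_unique_extend_py existing candidates out) := by unfold Spec_unique_extend_py; infer_instance

-- ===== CLAIM (what is proved, stated in full; the proofs are below) =====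
def Claim_equal_unique_extend_py : Prop := ∀ (existing : List String) (candidates : List String), Dom_unique_extend_py existing candidates → Spec_unique_extend_py existing candidates (unique_extend_py existing candidates)

-- ===== LEMMAS AND PROOFS =====

-- Drop helper: splitting off the prefix of an append.
theorem pv_drop_pref (s : List String) (c : String) (t : List String) :
    (s ++ [c] ++ t).drop s.length = c :: t := by
  rw [List.append_assoc]
  exact List.drop_left (l₁ := s) (l₂ := [c] ++ t)

-- Set.update only appends: the old set is a prefix of the updated one.
theorem pv_update_prefix (l : List String) (s : PySem.Set String) :
    ∃ t, PySem.Set.update s l = s ++ t := by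
  induction l generalizing s with
  | nil => exact ⟨[], by simp [PySem.Set.update]⟩
  | cons c cs ih =>
    have hstep : PySem.Set.update s (c :: cs) = PySem.Set.update (PySem.Set.add s c) cs := by
      simp [PySem.Set.update]
    by_cases h : PySem.Set.contains s c = true
    · have hadd : PySem.Set.add s c = s := by simp only [PySem.Set.add, if_pos h]
      rw [hstep, hadd]; exact ih s
    · have hadd : PySem.Set.add s c = s ++ [c] := by simp only [PySem.Set.add, if_neg h]
      obtain ⟨t, ht⟩ := ih (s ++ [c])
      exact ⟨c :: t, by rw [hstep, hadd, ht]; simp⟩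

-- A's loop returns adds ++ (the elements Set.update appends to seen).
theorem pv_loopA (cs : List String) (adds : List String) (seen : PySem.Set String) :
    (cs.foldl
      (fun (st : List String × PySem.Set String) item =>
        if !(PySem.Set.contains st.2 item) then (st.1 ++ [item], PySem.Set.add st.2 item) else st)
      (adds, seen)).1
    = adds ++ (PySem.Set.update seen cs).drop seen.length := by
  induction cs generalizing adds seen with
  | nil => simp [PySem.Set.update]
  | cons c cs ih =>
    have hupd : PySem.Set.update seen (c :: cs) = PySem.Set.update (PySem.Set.add seen c) cs := by
      simp [PySem.Set.update]
    by_cases h : PySem.Set.contains seen c = true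
    · have hadd : PySem.Set.add seen c = seen := by simp only [PySem.Set.add, if_pos h]
      simp only [List.foldl_cons, h, Bool.not_true, Bool.false_eq_true, if_false]
      rw [ih, hupd, hadd]
    · have hb : PySem.Set.contains seen c = false := by
        cases hv : PySem.Set.contains seen c <;> simp_all
      have hadd : PySem.Set.add seen c = seen ++ [c] := by simp only [PySem.Set.add, if_neg h]
      simp only [List.foldl_cons, hb, Bool.not_false, if_true]
      rw [ih, hupd, hadd]
      obtain ⟨t, ht⟩ := pv_update_prefix cs (seen ++ [c])
      rw [ht, pv_drop_pref, List.drop_left]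
      simp

-- ofList commutes with an arbitrary filter (first occurrences survive filtering).
theorem pv_ofList_filter (p : String → Bool) (l : List String) :
    PySem.Set.ofList (l.filter p) = (PySem.Set.ofList l).filter p := by
  induction l with
  | nil => simp
  | cons h t ih =>
    by_cases hp : p h = true
    · rw [List.filter_cons, if_pos hp, PySem.Set.ofList_cons, PySem.Set.ofList_cons,
        PySem.Set.discard, PySem.Set.discard, ih, List.filter_comm,
        List.filter_cons, if_pos hp]
    · have hp' : p h = false := by cases hv : p h <;> simp_all
      rw [List.filter_cons, if_neg (by simp [hp']), PySem.Set.ofList_cons,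
        PySem.Set.discard, ih, List.filter_cons, if_neg (by simp [hp']), List.filter_comm]
      symm
      apply List.filter_eq_self.mpr
      intro a ha
      have hap : p a = true := List.of_mem_filter ha
      have hne : a ≠ h := by intro he; rw [he, hp'] at hap; exact Bool.false_ne_true hap
      simpa using hne

-- B's worklist loop computes out ++ the in-order dedup of work, filtered against existing.
theorem pv_loopB (existing out work : List String) :
    pvAltLoop existing out work
    = out ++ (PySem.Set.ofList work).filter (fun c => !(existing.contains c)) := by
  induction hn : work.length using Nat.strong_induction_on generalizing work out with
  | _ n ih =>
    match work with
    | [] => rw [pvAltLoop.eq_def]; simp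
    | head :: rest =>
      have hlen : (rest.filter (fun c => !(c == head))).length < n := by
        rw [← hn]
        exact Nat.lt_succ_of_le (List.length_filter_le _ rest)
      have ih1 := ih _ hlen (if existing.contains head then out else out ++ [head])
        (rest.filter (fun c => !(c == head))) rfl
      rw [pvAltLoop.eq_def]
      simp only []
      rw [ih1, pv_ofList_filter, PySem.Set.ofList_cons, PySem.Set.discard]
      by_cases h : existing.contains head = true
      · rw [if_pos h, List.filter_cons, if_neg (by rw [h]; simp), List.filter_comm]
      · have h' : existing.contains head = false := by cases hv : existing.contains head <;> simp_all
        rw [if_neg (by rw [h']; simp), List.filter_cons, if_pos (by rw [h']; simp), List.filter_comm]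
        simp

-- ===== VERDICT (by name: the statement is the Claim_ definition above) =====
theorem unique_extend_py_spec : Claim_equal_unique_extend_py := by
  intro existing candidates _
  unfold Spec_unique_extend_py unique_extend_py unique_extend_py_alt
  rw [pv_loopA, pv_loopB, List.nil_append, List.nil_append,
    PySem.Set.update_eq_append_filter, List.drop_left]
  apply List.filter_congr
  intro x _
  rw [PySem.Set.contains_eq_listContains]
  have h1 : List.contains (PySem.Set.ofList existing) x = decide (x ∈ PySem.Set.ofList existing) := by simp
  have h2 : existing.contains x = decide (x ∈ existing) := by simp
  rw [h1, h2]
  simp [PySem.Set.mem_ofList]
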